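-- pv_equiv track=rewrite | github.com/archimbald4488/Python | Data Structures/Viikko 7/Car sales.py | sales
-- ===== SOURCE A (Python) =====
-- def sales(cars, customers):
--     # sort the lists
--     cars.sort()
--     customers.sort()
--
--     # make pointers to iterate with
--     carP = 0
--     customerP = 0
--     sales = 0
--
--     while carP < len(cars) and customerP < len(customers):
--
--         if customers[customerP] >= cars[carP]:
--             sales += 1
--             carP += 1  # move to the next car & customer
--         customerP += 1
--
--     return sales
-- ===== SOURCE B (Python) =====
-- def sales(cars, customers):
--     # in-place sorts, same caller-visible mutation as the original
--     cars.sort()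
--     customers.sort()
--
--     i = len(cars) - 1
--     j = len(customers) - 1
--     avail = 0   # customers seen so far that can afford every remaining car
--     count = 0
--     # single descending sweep over both lists; at equal value the
--     # customer is consumed first (the affordability test is inclusive)
--     while i >= 0:
--         if j >= 0 and customers[j] >= cars[i]:
--             avail += 1
--             j -= 1
--         else:
--             if avail > 0:
--                 count += 1
--                 avail -= 1
--             i -= 1
--     return count
-- ===== Notes on version B (the rewrite author's own statement) =====
-- stated objective: alternative
-- what changed: Replaces the ascending two-pointer greedy (advance a customer each step, match when it affords the current car) with a single descending sweep over both sorted lists that maintains a counter of customers seen so far and matches each car against that counter, customers consumed before equal-valued cars.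
import Mathlib
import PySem

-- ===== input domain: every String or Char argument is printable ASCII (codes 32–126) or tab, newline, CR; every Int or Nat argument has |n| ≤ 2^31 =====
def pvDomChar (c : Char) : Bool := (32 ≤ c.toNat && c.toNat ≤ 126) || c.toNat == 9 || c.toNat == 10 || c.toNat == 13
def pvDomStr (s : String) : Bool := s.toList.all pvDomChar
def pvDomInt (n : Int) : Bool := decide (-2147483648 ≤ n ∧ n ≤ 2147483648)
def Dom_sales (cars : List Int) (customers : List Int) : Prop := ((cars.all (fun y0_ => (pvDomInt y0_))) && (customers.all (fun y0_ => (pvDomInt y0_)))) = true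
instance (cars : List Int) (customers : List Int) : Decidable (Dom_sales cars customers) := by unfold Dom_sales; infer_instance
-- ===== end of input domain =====

-- B: same maximum-matching count by a descending merge sweep with an availability
-- counter instead of A's ascending two-pointer greedy (objective: alternative).
-- Both A and B sort the two argument lists in place; the theorems are about the return value
-- (the mutation is identical in A and B).

-- ===== PORT A =====
-- the two-pointer while loop of A: carP/customerP walk the sorted lists;
-- recursion consumes the customer list each step (customerP += 1), and the car
-- list as well on a match
def salesLoop : List Int → List Int → Int
  | a :: as, c :: cs => if c ≥ a then 1 + salesLoop as cs else salesLoop (a :: as) cs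
  | _, _ => 0
termination_by _ cs => cs.length

def sales (cars : List Int) (customers : List Int) : Int :=
  salesLoop (PySem.List.sorted cars (fun x => x) false) (PySem.List.sorted customers (fun x => x) false)

-- ===== PORT B =====
-- B's while loop, on the two sorted lists read back-to-front (indices i, j walk
-- down): k is the avail counter, first branch consumes a customer, second a car
def salesSweep : List Int → List Int → Int → Int
  | a :: as, c :: cs, k =>
      if c ≥ a then salesSweep (a :: as) cs (k + 1)
      else if k > 0 then 1 + salesSweep as (c :: cs) (k - 1) else salesSweep as (c :: cs) k
  | a :: as, [], k =>
      if k > 0 then 1 + salesSweep as [] (k - 1) else salesSweep as [] k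
  | [], _, _ => 0
termination_by as cs _ => as.length + cs.length

def sales_alt (cars : List Int) (customers : List Int) : Int :=
  salesSweep (PySem.List.sorted cars (fun x => x) false).reverse
             (PySem.List.sorted customers (fun x => x) false).reverse 0

-- ===== PRECONDITION & SPEC =====
def Spec_sales (cars : List Int) (customers : List Int) (out : Int) : Prop := out = sales_alt cars customers
instance (cars : List Int) (customers : List Int) (out : Int) : Decidable (Spec_sales cars customers out) := by unfold Spec_sales; infer_instance

-- ===== CLAIM (what is proved, stated in full; the proofs are below) =====
def Claim_equal_sales : Prop := ∀ (cars : List Int) (customers : List Int), Dom_sales cars customers → Spec_sales cars customers (sales cars customers)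

-- ===== LEMMAS AND PROOFS =====

-- A's loop generalized with a reserve of k universal customers usable once the
-- customer list is exhausted (proof device linking the two loops)
def fK : List Int → List Int → Int → Int
  | a :: as, c :: cs, k => if c ≥ a then 1 + fK as cs k else fK (a :: as) cs k
  | as, [], k => min (as.length : Int) (max k 0)
  | [], _, _ => 0
termination_by _ cs _ => cs.length

theorem fK_nil (cs : List Int) (k : Int) : fK [] cs k = 0 := by
  cases cs <;> simp [fK]

theorem salesLoop_eq_fK0 (as cs : List Int) : salesLoop as cs = fK as cs 0 := by
  induction as, cs using salesLoop.induct with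
  | case1 a as c cs h ih => simp [salesLoop, fK, h, ih]
  | case2 a as c cs h ih => simp [salesLoop, fK, h, ih]
  | case3 as cs h =>
      cases as with
      | nil => simp [salesLoop, fK_nil]
      | cons a as =>
          cases cs with
          | nil => simp [salesLoop, fK]; omega
          | cons c cs => exact (h a as c cs rfl rfl).elim

-- appending one customer ≥ every car equals bumping the reserve
theorem fK_append_customer (cs as : List Int) (c k : Int) (hk : 0 ≤ k)
    (hc : ∀ a ∈ as, a ≤ c) : fK as (cs ++ [c]) k = fK as cs (k + 1) := by
  induction cs generalizing as with
  | nil =>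
      match as with
      | [] => simp [fK]
      | a :: as =>
          have ha : a ≤ c := hc a (by simp)
          have h1 : fK (a :: as) ([] ++ [c]) k = 1 + fK as [] k := by
            simp [fK, ha]
          rw [h1]
          simp only [fK, List.length_cons]
          push_cast
          omega
  | cons c' cs' ih =>
      match as with
      | [] => simp [fK_nil]
      | a :: as =>
          by_cases h : c' ≥ a
          · have h1 : fK (a :: as) ((c' :: cs') ++ [c]) k = 1 + fK as (cs' ++ [c]) k := by
              simp [fK, h]
            have h2 : fK (a :: as) (c' :: cs') (k + 1) = 1 + fK as cs' (k + 1) := by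
              simp [fK, h]
            rw [h1, h2, ih as (fun x hx => hc x (by simp [hx]))]
          · have h1 : fK (a :: as) ((c' :: cs') ++ [c]) k = fK (a :: as) (cs' ++ [c]) k := by
              simp [fK, h]
            have h2 : fK (a :: as) (c' :: cs') (k + 1) = fK (a :: as) cs' (k + 1) := by
              simp [fK, h]
            rw [h1, h2, ih (a :: as) hc]

-- appending one car larger than every customer: it can only be matched from the reserve
theorem fK_append_car (cs as : List Int) (a k : Int) (hk : 0 ≤ k)
    (ha : ∀ c ∈ cs, c < a) :
    fK (as ++ [a]) cs k = if k > 0 then 1 + fK as cs (k - 1) else fK as cs k := by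
  induction cs generalizing as k with
  | nil =>
      match as with
      | [] => simp only [List.nil_append, fK, List.length_cons, List.length_nil]
              push_cast; split <;> omega
      | a' :: as' =>
          simp only [List.cons_append, fK, List.length_append, List.length_cons,
            List.length_nil]
          push_cast
          split <;> omega
  | cons c' cs' ih =>
      have hlt : c' < a := ha c' (by simp)
      have ha' : ∀ x ∈ cs', x < a := fun x hx => ha x (by simp [hx])
      match as with
      | [] =>
          have h1 : fK ([] ++ [a]) (c' :: cs') k = fK [a] cs' k := by
            simp [fK, not_le.mpr hlt]
          have h2 := ih [] k hk ha'
          simp only [List.nil_append] at h2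
          rw [h1, h2, fK_nil, fK_nil, fK_nil, fK_nil]
      | a' :: as' =>
          by_cases h : c' ≥ a'
          · have h1 : fK ((a' :: as') ++ [a]) (c' :: cs') k = 1 + fK (as' ++ [a]) cs' k := by
              simp [fK, h]
            have h2 : ∀ k', fK (a' :: as') (c' :: cs') k' = 1 + fK as' cs' k' := by
              intro k'; simp [fK, h]
            rw [h1, ih as' k hk ha', h2 (k - 1), h2 k]
            split <;> ring
          · have h1 : fK ((a' :: as') ++ [a]) (c' :: cs') k = fK ((a' :: as') ++ [a]) cs' k := by
              simp [fK, h]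
            have h2 : ∀ k', fK (a' :: as') (c' :: cs') k' = fK (a' :: as') cs' k' := by
              intro k'; simp [fK, h]
            rw [h1, ih (a' :: as') k hk ha', h2 (k - 1), h2 k]

-- the sweep on descending lists equals fK on their ascending reversals
theorem salesSweep_eq_fK (as cs : List Int) (k : Int) (hk : 0 ≤ k)
    (has : as.Pairwise (fun x y => y ≤ x)) (hcs : cs.Pairwise (fun x y => y ≤ x)) :
    salesSweep as cs k = fK as.reverse cs.reverse k := by
  induction as, cs, k using salesSweep.induct with
  | case1 a as c cs k h ih =>
      -- customer c consumed: c ≥ a ≥ every remaining car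
      have hmem : ∀ x ∈ (a :: as).reverse, x ≤ c := by
        intro x hx
        simp only [List.mem_reverse] at hx
        rcases List.mem_cons.mp hx with rfl | hx
        · exact h
        · exact le_trans ((List.pairwise_cons.mp has).1 x hx) h
      rw [show salesSweep (a :: as) (c :: cs) k = salesSweep (a :: as) cs (k + 1) from by
            simp [salesSweep, h],
          show (c :: cs).reverse = cs.reverse ++ [c] from by simp,
          fK_append_customer _ _ _ _ hk hmem]
      exact ih (by omega) has (List.pairwise_cons.mp hcs).2
  | case2 a as c cs k h hk' ih =>
      have hmem : ∀ x ∈ (c :: cs).reverse, x < a := by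
        intro x hx
        simp only [List.mem_reverse] at hx
        rcases List.mem_cons.mp hx with rfl | hx
        · omega
        · have := (List.pairwise_cons.mp hcs).1 x hx; omega
      rw [show salesSweep (a :: as) (c :: cs) k = 1 + salesSweep as (c :: cs) (k - 1) from by
            simp [salesSweep, h, hk'],
          show (a :: as).reverse = as.reverse ++ [a] from by simp,
          fK_append_car _ _ _ _ hk hmem, if_pos hk',
          ih (by omega) (List.pairwise_cons.mp has).2 hcs]
  | case3 a as c cs k h hk' ih =>
      have hmem : ∀ x ∈ (c :: cs).reverse, x < a := by
        intro x hx
        simp only [List.mem_reverse] at hx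
        rcases List.mem_cons.mp hx with rfl | hx
        · omega
        · have := (List.pairwise_cons.mp hcs).1 x hx; omega
      rw [show salesSweep (a :: as) (c :: cs) k = salesSweep as (c :: cs) k from by
            simp [salesSweep, h, hk'],
          show (a :: as).reverse = as.reverse ++ [a] from by simp,
          fK_append_car _ _ _ _ hk hmem, if_neg hk',
          ih hk (List.pairwise_cons.mp has).2 hcs]
  | case4 a as k hk' ih =>
      rw [show salesSweep (a :: as) [] k = 1 + salesSweep as [] (k - 1) from by
            simp [salesSweep, hk'],
          show (a :: as).reverse = as.reverse ++ [a] from by simp,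
          show ([] : List Int).reverse = [] from rfl,
          fK_append_car _ _ _ _ hk (by simp), if_pos hk']
      have := ih (by omega) (List.pairwise_cons.mp has).2 List.Pairwise.nil
      simpa using this
  | case5 a as k hk' ih =>
      rw [show salesSweep (a :: as) [] k = salesSweep as [] k from by
            simp [salesSweep, hk'],
          show (a :: as).reverse = as.reverse ++ [a] from by simp,
          show ([] : List Int).reverse = [] from rfl,
          fK_append_car _ _ _ _ hk (by simp), if_neg hk']
      have := ih hk (List.pairwise_cons.mp has).2 List.Pairwise.nil
      simpa using this
  | case6 cs k =>
      simp [salesSweep, fK_nil]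

-- ===== VERDICT (by name: the statement is the Claim_ definition above) =====
theorem sales_spec : Claim_equal_sales := by
  intro cars customers _
  unfold Spec_sales sales sales_alt
  set A := PySem.List.sorted cars (fun x => x) false with hA
  set C := PySem.List.sorted customers (fun x => x) false with hC
  have hAp : A.Pairwise (fun x y : Int => x ≤ y) := PySem.List.sorted_pairwise cars (fun x => x)
  have hCp : C.Pairwise (fun x y : Int => x ≤ y) := PySem.List.sorted_pairwise customers (fun x => x)
  rw [salesSweep_eq_fK _ _ _ le_rfl (List.pairwise_reverse.mpr hAp) (List.pairwise_reverse.mpr hCp)]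
  simp only [List.reverse_reverse]
  exact salesLoop_eq_fK0 A C
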